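-- pv_equiv track=rewrite | github.com/socathie/CodeFights | Tournaments/crossroads.py | crossroads
-- ===== SOURCE A (Python) =====
-- def crossroads(road1, road2, crossTime):
--     j = 0
--     for i in range(len(road1)):
--         while j < len(road2) and road2[j] < road1[i]:
--             if road2[j] + crossTime > road1[i]:
--                 return True
--             j += 1
--         if j < len(road2) and road1[i] + crossTime > road2[j]:
--             return True
--     return False
-- ===== SOURCE B (Python) =====
-- def crossroads(road1, road2, crossTime):
--     # Per-element binary search into the sorted road2 instead of a linear merge.
--     n = len(road2)
--     for a in road1:
--         lo, hi = 0, n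
--         while lo < hi:
--             mid = (lo + hi) // 2
--             if road2[mid] < a:
--                 lo = mid + 1
--             else:
--                 hi = mid
--         if lo < n and abs(a - road2[lo]) < crossTime:
--             return True
--         if lo > 0 and abs(a - road2[lo - 1]) < crossTime:
--             return True
--     return False
-- ===== Notes on version B (the rewrite author's own statement) =====
-- stated objective: alternative
-- what changed: Replaces A's two-pointer linear merge with a per-element hand-written binary search (bisect_left) into the sorted road2, checking only the two neighbors of the insertion point.
-- outside the precondition, e.g. on crossroads([10, 0], [1], 2): A returns False, B returns True
import Mathlib
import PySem

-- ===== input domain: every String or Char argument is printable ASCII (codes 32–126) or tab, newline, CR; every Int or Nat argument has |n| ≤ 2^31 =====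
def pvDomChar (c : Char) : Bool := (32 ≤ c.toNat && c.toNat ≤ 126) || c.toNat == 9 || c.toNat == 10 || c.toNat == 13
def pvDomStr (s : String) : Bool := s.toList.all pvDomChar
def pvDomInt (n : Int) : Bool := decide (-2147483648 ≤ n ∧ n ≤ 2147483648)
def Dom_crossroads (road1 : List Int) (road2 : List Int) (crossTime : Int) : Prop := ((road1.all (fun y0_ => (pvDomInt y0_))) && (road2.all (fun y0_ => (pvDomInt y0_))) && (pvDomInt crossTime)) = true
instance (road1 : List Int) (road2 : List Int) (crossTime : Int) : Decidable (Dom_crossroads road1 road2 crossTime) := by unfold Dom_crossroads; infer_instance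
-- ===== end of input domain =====

-- B replaces A's two-pointer linear merge by a per-element hand-written binary search into the
-- sorted road2 (alternative algorithm, same contract: both schedules sorted ascending).

-- ===== PORT A =====
-- A's inner 'while' loop: 'none' means A executed 'return True' inside the while,
-- 'some j' is the value of the pointer j when the while exits.
def crossroadsInner (road2 : List Int) (crossTime : Int) (x : Int) (j : Nat) : Option Nat :=
  if h : j < road2.length ∧ road2.getD j 0 < x then
    if road2.getD j 0 + crossTime > x then none
    else crossroadsInner road2 crossTime x (j + 1)
  else some j
termination_by road2.length - j
decreasing_by omega

-- A's outer 'for i in range(len(road1))' loop with the carried pointer j.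
def crossroadsOuter (road1 : List Int) (road2 : List Int) (crossTime : Int) (i j : Nat) : Bool :=
  if h_ : i < road1.length then
    match crossroadsInner road2 crossTime (road1.getD i 0) j with
    | none => true
    | some j' =>
      if j' < road2.length ∧ road1.getD i 0 + crossTime > road2.getD j' 0 then true
      else crossroadsOuter road1 road2 crossTime (i + 1) j'
  else false
termination_by road1.length - i
decreasing_by omega

def crossroads (road1 : List Int) (road2 : List Int) (crossTime : Int) : Bool :=
  crossroadsOuter road1 road2 crossTime 0 0

-- ===== PORT B =====
-- B's hand-written bisect_left while-loop (indices always in range in Python; getD is exact there).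
def bisectLeft (road2 : List Int) (a : Int) (lo hi : Nat) : Nat :=
  if _h : lo < hi then
    if road2.getD ((lo + hi) / 2) 0 < a then bisectLeft road2 a ((lo + hi) / 2 + 1) hi
    else bisectLeft road2 a lo ((lo + hi) / 2)
  else lo
termination_by hi - lo
decreasing_by all_goals omega

-- B's 'for a in road1' loop.
def crossroadsAltLoop (road2 : List Int) (crossTime : Int) : List Int → Bool
  | [] => false
  | a :: rest =>
    let lo := bisectLeft road2 a 0 road2.length
    if lo < road2.length ∧ |a - road2.getD lo 0| < crossTime then true
    else if 0 < lo ∧ |a - road2.getD (lo - 1) 0| < crossTime then true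
    else crossroadsAltLoop road2 crossTime rest

def crossroads_alt (road1 : List Int) (road2 : List Int) (crossTime : Int) : Bool :=
  crossroadsAltLoop road2 crossTime road1

-- ===== PRECONDITION & SPEC =====
-- Pre_ excludes inputs on which A still returns: the task's contract is that both schedules are
-- sorted ascending, and on an unsorted input A's merge-scan answer is an artefact of its one-way
-- pointer movement (e.g. road1 = [10, 0], road2 = [1], crossTime = 2); the inputs whose answer is
-- trivially False regardless of order (an empty schedule, or crossTime ≤ 0) are kept inside Pre_.
def Pre_crossroads (road1 : List Int) (road2 : List Int) (crossTime : Int) : Prop :=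
  (road1.Pairwise (· ≤ ·) ∧ road2.Pairwise (· ≤ ·)) ∨ road1 = [] ∨ road2 = [] ∨ crossTime ≤ 0
instance (road1 : List Int) (road2 : List Int) (crossTime : Int) : Decidable (Pre_crossroads road1 road2 crossTime) := by unfold Pre_crossroads; infer_instance

def pvWitness_crossroads : List Int × List Int × Int := ([1, 5], [3, 9], 2)

def Spec_crossroads (road1 : List Int) (road2 : List Int) (crossTime : Int) (out : Bool) : Prop := out = crossroads_alt road1 road2 crossTime
instance (road1 : List Int) (road2 : List Int) (crossTime : Int) (out : Bool) : Decidable (Spec_crossroads road1 road2 crossTime out) := by unfold Spec_crossroads; infer_instance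

-- ===== CLAIM (what is proved, stated in full; the proofs are below) =====
def Claim_equal_crossroads : Prop := ∀ (road1 : List Int) (road2 : List Int) (crossTime : Int), Dom_crossroads road1 road2 crossTime → Pre_crossroads road1 road2 crossTime → Spec_crossroads road1 road2 crossTime (crossroads road1 road2 crossTime)

-- ===== LEMMAS AND PROOFS =====

-- the common semantics: some pair is closer than crossTime
def collide (road1 road2 : List Int) (ct : Int) : Bool :=
  road1.any fun a => road2.any fun b => decide (|a - b| < ct)

theorem bool_eq_of_iff {a b : Bool} (h : a = true ↔ b = true) : a = b := by
  cases a <;> cases b <;> simp_all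

theorem sorted_getD {l : List Int} (h : l.Pairwise (· ≤ ·)) {i j : Nat}
    (hij : i ≤ j) (hj : j < l.length) : l.getD i 0 ≤ l.getD j 0 := by
  rcases Nat.lt_or_eq_of_le hij with hlt | heq
  · rw [l.getD_eq_getElem 0 (lt_trans hlt hj), l.getD_eq_getElem 0 hj]
    exact List.pairwise_iff_getElem.mp h i j _ _ hlt
  · subst heq; rfl

theorem any_getD (l : List Int) (p : Int → Bool) :
    l.any p = true ↔ ∃ k, k < l.length ∧ p (l.getD k 0) = true := by
  rw [List.any_eq_true]
  constructor
  · rintro ⟨b, hb, hp⟩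
    obtain ⟨k, hk, rfl⟩ := List.mem_iff_getElem.mp hb
    exact ⟨k, hk, by rwa [l.getD_eq_getElem 0 hk]⟩
  · rintro ⟨k, hk, hp⟩
    exact ⟨l.getD k 0, by rw [l.getD_eq_getElem 0 hk]; exact List.getElem_mem hk, hp⟩

theorem inner_none {road2 : List Int} {ct x : Int} : ∀ {j : Nat},
    crossroadsInner road2 ct x j = none →
    ∃ k, j ≤ k ∧ k < road2.length ∧ road2.getD k 0 < x ∧ x < road2.getD k 0 + ct := by
  intro j
  fun_induction crossroadsInner road2 ct x j with
  | case1 j h hret => exact fun _ => ⟨j, le_refl _, h.1, h.2, by omega⟩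
  | case2 j h hret ih =>
    intro hn
    obtain ⟨k, hk1, hk2, hk3⟩ := ih hn
    exact ⟨k, by omega, hk2, hk3⟩
  | case3 j h => intro hn; simp at hn

theorem inner_some {road2 : List Int} {ct x : Int} : ∀ {j j' : Nat},
    crossroadsInner road2 ct x j = some j' →
    j ≤ j' ∧ (∀ k, j ≤ k → k < j' → road2.getD k 0 < x ∧ road2.getD k 0 + ct ≤ x) ∧
      (j' < road2.length → x ≤ road2.getD j' 0) := by
  intro j j'
  fun_induction crossroadsInner road2 ct x j with
  | case1 j h hret => intro hs; simp at hs
  | case2 j h hret ih =>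
    intro hs
    obtain ⟨h1, h2, h3⟩ := ih hs
    refine ⟨by omega, ?_, h3⟩
    intro k hk1 hk2
    rcases Nat.lt_or_ge k (j + 1) with hk | hk
    · have : k = j := by omega
      subst this
      exact ⟨h.2, by omega⟩
    · exact h2 k hk hk2
  | case3 j h =>
    intro hs
    have : j = j' := by simpa using hs
    subst this
    refine ⟨le_refl _, by omega, ?_⟩
    intro hlen
    by_contra hc
    exact h ⟨hlen, by omega⟩

theorem outer_true {road1 road2 : List Int} {ct : Int} : ∀ {i j : Nat},
    crossroadsOuter road1 road2 ct i j = true →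
    ∃ i' k, i' < road1.length ∧ k < road2.length ∧ |road1.getD i' 0 - road2.getD k 0| < ct := by
  intro i j
  fun_induction crossroadsOuter road1 road2 ct i j with
  | case1 i j h hinner =>
    intro _
    obtain ⟨k, _, hk2, hk3, hk4⟩ := inner_none hinner
    exact ⟨i, k, h, hk2, by rw [abs_lt]; omega⟩
  | case2 i j h j' hinner hchk =>
    intro _
    have hge := (inner_some hinner).2.2 hchk.1
    exact ⟨i, j', h, hchk.1, by rw [abs_lt]; omega⟩
  | case3 i j h j' hinner hchk ih => exact ih
  | case4 i j h => intro hc; simp at hc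

theorem outer_false {road1 road2 : List Int} {ct : Int}
    (h1 : road1.Pairwise (· ≤ ·)) (h2 : road2.Pairwise (· ≤ ·)) : ∀ (n i j : Nat),
    road1.length ≤ i + n →
    (∀ k, k < j → k < road2.length → ∀ i', i ≤ i' → i' < road1.length →
      road2.getD k 0 + ct ≤ road1.getD i' 0) →
    crossroadsOuter road1 road2 ct i j = false →
    ∀ i' k, i ≤ i' → i' < road1.length → k < road2.length →
      ¬ |road1.getD i' 0 - road2.getD k 0| < ct := by
  intro n
  induction n with
  | zero => intro i j hn hinv hfalse i' k hii' hi'len hk; omega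
  | succ n ih =>
    intro i j hn hinv hfalse i' k hii' hi'len hk
    by_cases hi : i < road1.length
    · rw [crossroadsOuter, dif_pos hi] at hfalse
      cases hinner : crossroadsInner road2 ct (road1.getD i 0) j with
      | none => simp only [hinner] at hfalse; exact Bool.noConfusion hfalse
      | some j' =>
        simp only [hinner] at hfalse
        by_cases hchk : j' < road2.length ∧ road1.getD i 0 + ct > road2.getD j' 0
        · rw [if_pos hchk] at hfalse; simp at hfalse
        · rw [if_neg hchk] at hfalse
          obtain ⟨hjj', hskip, hge⟩ := inner_some hinner
          have hinv' : ∀ k, k < j' → k < road2.length → ∀ i'', i + 1 ≤ i'' → i'' < road1.length →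
              road2.getD k 0 + ct ≤ road1.getD i'' 0 := by
            intro k hkj' hkn i'' hi'' hi''len
            by_cases hk2 : k < j
            · exact hinv k hk2 hkn i'' (by omega) hi''len
            · have hs := (hskip k (by omega) hkj').2
              have hx : road1.getD i 0 ≤ road1.getD i'' 0 := sorted_getD h1 (by omega) hi''len
              omega
          rcases Nat.lt_or_ge i' (i + 1) with hcase | hcase
          · have heq : i' = i := by omega
            subst heq
            rcases Nat.lt_or_ge k j' with hkcase | hkcase
            · by_cases hk2 : k < j
              · have := hinv k hk2 hk i' (le_refl _) hi'len
                intro habs; rw [abs_lt] at habs; omega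
              · have := (hskip k (by omega) hkcase).2
                intro habs; rw [abs_lt] at habs; omega
            · have hj'n : j' < road2.length := by omega
              have hxe := hge hj'n
              have h2k : road2.getD j' 0 ≤ road2.getD k 0 := sorted_getD h2 hkcase hk
              have hnc : ¬ road1.getD i' 0 + ct > road2.getD j' 0 := fun hc => hchk ⟨hj'n, hc⟩
              intro habs; rw [abs_lt] at habs; omega
          · exact ih (i + 1) j' (by omega) hinv' hfalse i' k hcase hi'len hk
    · omega

theorem A_eq_collide {road1 road2 : List Int} {ct : Int}
    (h1 : road1.Pairwise (· ≤ ·)) (h2 : road2.Pairwise (· ≤ ·)) :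
    crossroads road1 road2 ct = collide road1 road2 ct := by
  apply bool_eq_of_iff
  constructor
  · intro hA
    obtain ⟨i', k, hi', hk, habs⟩ := outer_true hA
    rw [collide, any_getD]
    exact ⟨i', hi', by rw [any_getD]; exact ⟨k, hk, by simpa using habs⟩⟩
  · intro hC
    rw [collide, any_getD] at hC
    obtain ⟨i', hi', hC2⟩ := hC
    rw [any_getD] at hC2
    obtain ⟨k, hk, habs⟩ := hC2
    by_contra hA
    have hA' : crossroads road1 road2 ct = false := by
      cases h : crossroads road1 road2 ct
      · rfl
      · exact absurd h hA
    exact outer_false h1 h2 road1.length 0 0 (by omega) (by omega) hA' i' k (by omega) hi' hk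
      (by simpa using habs)

theorem bisect_spec {road2 : List Int} {a : Int} (h2 : road2.Pairwise (· ≤ ·)) :
    ∀ (lo hi : Nat), lo ≤ hi → hi ≤ road2.length →
    (∀ k, k < lo → road2.getD k 0 < a) →
    (∀ k, hi ≤ k → k < road2.length → a ≤ road2.getD k 0) →
    (∀ k, k < bisectLeft road2 a lo hi → road2.getD k 0 < a) ∧
    (∀ k, bisectLeft road2 a lo hi ≤ k → k < road2.length → a ≤ road2.getD k 0) ∧
    bisectLeft road2 a lo hi ≤ road2.length := by
  intro lo hi
  fun_induction bisectLeft road2 a lo hi with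
  | case1 lo hi h hlt ih =>
    intro hlohi hhilen hlo hhi
    refine ih (by omega) hhilen ?_ hhi
    intro k hkm
    rcases Nat.lt_or_ge k lo with hkl | hkl
    · exact hlo k hkl
    · calc road2.getD k 0 ≤ road2.getD ((lo + hi) / 2) 0 :=
            sorted_getD h2 (by omega) (by omega)
        _ < a := hlt
  | case2 lo hi h hlt ih =>
    intro hlohi hhilen hlo hhi
    refine ih (by omega) (by omega) hlo ?_
    intro k hkm hklen
    calc a ≤ road2.getD ((lo + hi) / 2) 0 := by omega
      _ ≤ road2.getD k 0 := sorted_getD h2 hkm hklen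
  | case3 lo hi h =>
    intro hlohi hhilen hlo hhi
    exact ⟨hlo, fun k hk hklen => hhi k (by omega) hklen, by omega⟩

theorem B_eq_collide {road1 road2 : List Int} {ct : Int} (h2 : road2.Pairwise (· ≤ ·)) :
    crossroads_alt road1 road2 ct = collide road1 road2 ct := by
  rw [crossroads_alt, collide]
  induction road1 with
  | nil => rfl
  | cons a rest ih =>
    rw [crossroadsAltLoop]
    obtain ⟨hlt, hge, hle⟩ :=
      bisect_spec (a := a) h2 0 road2.length (by omega) (le_refl _) (by omega)
        (fun k hk hklen => by omega)
    apply bool_eq_of_iff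
    simp only [List.any_cons, Bool.or_eq_true, ← ih]
    set lo := bisectLeft road2 a 0 road2.length with hlo
    by_cases hfound : (lo < road2.length ∧ |a - road2.getD lo 0| < ct) ∨
        (0 < lo ∧ |a - road2.getD (lo - 1) 0| < ct)
    · constructor
      · intro _
        left
        rw [any_getD]
        rcases hfound with ⟨hl, habs⟩ | ⟨hl, habs⟩
        · exact ⟨lo, hl, by simpa using habs⟩
        · exact ⟨lo - 1, by omega, by simpa using habs⟩
      · intro _
        rcases hfound with ⟨hl, habs⟩ | ⟨hl, habs⟩
        · rw [if_pos ⟨hl, habs⟩]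
        · by_cases hfst : lo < road2.length ∧ |a - road2.getD lo 0| < ct
          · rw [if_pos hfst]
          · rw [if_neg hfst, if_pos ⟨hl, habs⟩]
    · push Not at hfound
      obtain ⟨hf1, hf2⟩ := hfound
      rw [if_neg, if_neg]
      · constructor
        · intro h; right; exact h
        · rintro (hany | h)
          · exfalso
            rw [any_getD] at hany
            obtain ⟨k, hk, habs⟩ := hany
            simp only [decide_eq_true_eq] at habs
            rcases Nat.lt_or_ge k lo with hkl | hkl
            · have hkv := hlt k hkl
              have hmono : road2.getD k 0 ≤ road2.getD (lo - 1) 0 :=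
                sorted_getD h2 (by omega) (by omega)
              have hglt := hlt (lo - 1) (by omega)
              have hc := hf2 (by omega)
              rw [abs_lt] at habs
              rw [abs_of_nonneg (by omega)] at hc
              omega
            · have hkv := hge k hkl hk
              have hmono : road2.getD lo 0 ≤ road2.getD k 0 := sorted_getD h2 hkl hk
              have hlo2 := hge lo (le_refl _) (by omega)
              have hc := hf1 (by omega)
              rw [abs_lt] at habs
              rw [abs_of_nonpos (by omega)] at hc
              omega
          · exact h
      · rintro ⟨hl, habs⟩; exact absurd habs (not_lt.mpr (hf2 hl))
      · rintro ⟨hl, habs⟩; exact absurd habs (not_lt.mpr (hf1 hl))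

-- A executes 'return True' only having seen a pair closer than crossTime, so crossTime > 0 then.
theorem A_true_pos {road1 road2 : List Int} {ct : Int}
    (h : crossroads road1 road2 ct = true) : 0 < ct := by
  obtain ⟨i', k, _, _, habs⟩ := outer_true h
  have := abs_nonneg (road1.getD i' 0 - road2.getD k 0)
  omega

-- likewise B's 'return True' needs |a - b| < crossTime for some pair
theorem alt_true_pos {road2 : List Int} {ct : Int} : ∀ {l : List Int},
    crossroadsAltLoop road2 ct l = true → 0 < ct := by
  intro l
  induction l with
  | nil => intro h; simp [crossroadsAltLoop] at h
  | cons a rest ih =>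
    intro h
    rw [crossroadsAltLoop] at h
    by_cases h1 : bisectLeft road2 a 0 road2.length < road2.length ∧
        |a - road2.getD (bisectLeft road2 a 0 road2.length) 0| < ct
    · have := abs_nonneg (a - road2.getD (bisectLeft road2 a 0 road2.length) 0); omega
    · rw [if_neg h1] at h
      by_cases h2 : 0 < bisectLeft road2 a 0 road2.length ∧
          |a - road2.getD (bisectLeft road2 a 0 road2.length - 1) 0| < ct
      · have := abs_nonneg (a - road2.getD (bisectLeft road2 a 0 road2.length - 1) 0); omega
      · rw [if_neg h2] at h; exact ih h

theorem outer_nil2 {road1 : List Int} {ct : Int} : ∀ {i j : Nat},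
    crossroadsOuter road1 [] ct i j = false := by
  intro i j
  fun_induction crossroadsOuter road1 [] ct i j with
  | case1 i j h hinner => simp [crossroadsInner] at hinner
  | case2 i j h j' hinner hchk => simp at hchk
  | case3 i j h j' hinner hchk ih => exact ih
  | case4 i j h => rfl

theorem altLoop_nil2 {ct : Int} : ∀ (l : List Int), crossroadsAltLoop [] ct l = false := by
  intro l
  induction l with
  | nil => rfl
  | cons a rest ih => simp [crossroadsAltLoop, bisectLeft, ih]

-- ===== VERDICT (by name: the statement is the Claim_ definition above) =====
theorem crossroads_spec : Claim_equal_crossroads := by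
  intro road1 road2 ct _hdom hpre
  unfold Spec_crossroads
  rcases hpre with ⟨hs1, hs2⟩ | h1 | h2 | hct
  · rw [A_eq_collide hs1 hs2, B_eq_collide hs2]
  · subst h1
    simp [crossroads, crossroadsOuter, crossroads_alt, crossroadsAltLoop]
  · subst h2
    rw [crossroads, crossroads_alt, outer_nil2, altLoop_nil2]
  · have hA : crossroads road1 road2 ct = false := by
      cases hA : crossroads road1 road2 ct
      · rfl
      · have := A_true_pos hA; omega
    have hB : crossroads_alt road1 road2 ct = false := by
      cases hB : crossroads_alt road1 road2 ct
      · rfl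
      · have := alt_true_pos (l := road1) hB; omega
    rw [hA, hB]
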